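-- pv_equiv track=rewrite | github.com/Ai-Whisperers/ultrametric-antigen-AI | deliverables/shared/primer_design.py | check_self_complementarity
-- ===== SOURCE A (Python) =====
-- def reverse_complement(seq: str) -> str:
--     """Get reverse complement of DNA sequence.
--
--     Args:
--         seq: DNA sequence (ACGT)
--
--     Returns:
--         Reverse complement sequence
--     """
--     complement = {"A": "T", "T": "A", "G": "C", "C": "G", "N": "N"}
--     return "".join(complement.get(base, "N") for base in reversed(seq.upper()))
--
-- def check_self_complementarity(seq: str, max_run: int = 4) -> int:
--     """Check for self-complementary runs (hairpins).
--
--     Args: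
--         seq: Primer sequence
--         max_run: Maximum allowed complementary run
--
--     Returns:
--         Longest self-complementary run found
--     """
--     seq = seq.upper()
--     rev_comp = reverse_complement(seq)
--     longest = 0
--
--     for i in range(len(seq)):
--         for j in range(len(rev_comp)):
--             run = 0
--             while (i + run < len(seq) and j + run < len(rev_comp) and
--                    seq[i + run] == rev_comp[j + run]):
--                 run += 1
--             longest = max(longest, run)
--
--     return longest
-- ===== SOURCE B (Python) =====
-- _COMP = {"A": "T", "T": "A", "G": "C", "C": "G", "N": "N"}
--
--
-- def _rev_comp(s: str) -> str:
--     return "".join(_COMP.get(base, "N") for base in reversed(s.upper()))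
--
--
-- def check_self_complementarity(seq: str, max_run: int = 4) -> int:
--     """Longest self-complementary run, via suffix-match dynamic programming
--     over seq and its reverse complement (one O(n^2) table pass instead of
--     rescanning the match for every start pair)."""
--     s = seq.upper()
--     t = _rev_comp(s)
--     m = len(t)
--     best = 0
--     next_row = [0] * (m + 1)
--     for i in range(len(s) - 1, -1, -1):
--         row = [0] * (m + 1)
--         for j in range(m - 1, -1, -1):
--             if s[i] == t[j]:
--                 v = next_row[j + 1] + 1
--                 row[j] = v
--                 if v > best:
--                     best = v
--         next_row = row
--     return best
-- ===== Notes on version B (the rewrite author's own statement) =====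
-- stated objective: faster
-- what changed: Replaced the per-pair while-loop scan (all start pairs, rescanning the match each time) with a longest-common-substring suffix DP: one table row per position, each cell derived from the previous row, so the longest run is found in one O(n^2) pass.
import Mathlib
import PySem

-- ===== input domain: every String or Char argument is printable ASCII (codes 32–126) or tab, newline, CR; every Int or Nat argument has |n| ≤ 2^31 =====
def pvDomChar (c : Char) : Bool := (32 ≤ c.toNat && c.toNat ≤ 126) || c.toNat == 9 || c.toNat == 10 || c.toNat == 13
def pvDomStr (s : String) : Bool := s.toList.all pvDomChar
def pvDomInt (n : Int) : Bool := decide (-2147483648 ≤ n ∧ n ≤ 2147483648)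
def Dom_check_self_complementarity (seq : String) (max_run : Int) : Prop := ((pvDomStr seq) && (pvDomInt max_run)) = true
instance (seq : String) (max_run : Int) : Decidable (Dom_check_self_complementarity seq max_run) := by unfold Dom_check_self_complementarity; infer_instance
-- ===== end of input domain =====

-- B replaces A's O(n^3) per-pair while-loop rescans by a longest-common-substring
-- suffix DP over seq and its reverse complement (one O(n^2) table pass).

-- ===== PORT A =====
-- complement.get(base, "N"): the dict lookup ported key by key at char level
-- (exact: every key and value of the Python dict is a single character).
def pvCompA (base : Char) : Char :=
  if base = 'A' then 'T'
  else if base = 'T' then 'A'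
  else if base = 'G' then 'C'
  else if base = 'C' then 'G'
  else if base = 'N' then 'N'
  else 'N'

-- reverse_complement(seq): "".join(complement.get(b, "N") for b in reversed(seq.upper()))
def pvRevCompA (s : List Char) : List Char :=
  ((PySem.Chars.upper s).reverse).map pvCompA

-- the inner `while` loop of A; indexing via getD is exact because the guard
-- checks the bounds first (Python's `and` short-circuits).
def pvWhileRun (s t : List Char) (i j run : Nat) : Nat :=
  if h : i + run < s.length ∧ j + run < t.length ∧ s.getD (i + run) ' ' = t.getD (j + run) ' '
  then pvWhileRun s t i j (run + 1)
  else run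
termination_by s.length - (i + run)
decreasing_by omega

def check_self_complementarity (seq : String) (max_run : Int) : Int :=
  let s := (PySem.Str.upper seq).toList
  let rev_comp := pvRevCompA s
  let longest := (List.range s.length).foldl
    (fun longest i => (List.range rev_comp.length).foldl
      (fun longest j => max longest (pvWhileRun s rev_comp i j 0)) longest) 0
  Int.ofNat longest

-- ===== PORT B =====
-- _COMP.get(base, "N"), ported key by key at char level as on the A side.
def pvCompB (base : Char) : Char :=
  if base = 'A' then 'T'
  else if base = 'T' then 'A'
  else if base = 'G' then 'C'
  else if base = 'C' then 'G'
  else if base = 'N' then 'N'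
  else 'N'

-- _rev_comp(s): "".join(_COMP.get(b, "N") for b in reversed(s.upper()))
def pvRevCompB (s : List Char) : List Char :=
  ((PySem.Chars.upper s).reverse).map pvCompB

-- state of B's loops: (best, current row); next_row is the outer state's row.
def check_self_complementarity_alt (seq : String) (max_run : Int) : Int :=
  let s := (PySem.Str.upper seq).toList
  let t := pvRevCompB s
  let m := t.length
  let res := ((List.range s.length).reverse).foldl
    (fun (st : Nat × List Nat) i =>
      ((List.range m).reverse).foldl
        (fun (st2 : Nat × List Nat) j =>
          if s.getD i ' ' = t.getD j ' ' then
            let v := st.2.getD (j + 1) 0 + 1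
            (if v > st2.1 then v else st2.1, st2.2.set j v)
          else st2)
        (st.1, List.replicate (m + 1) 0))
    (0, List.replicate (m + 1) 0)
  Int.ofNat res.1

-- ===== PRECONDITION & SPEC =====
def Spec_check_self_complementarity (seq : String) (max_run : Int) (out : Int) : Prop := out = check_self_complementarity_alt seq max_run
instance (seq : String) (max_run : Int) (out : Int) : Decidable (Spec_check_self_complementarity seq max_run out) := by unfold Spec_check_self_complementarity; infer_instance

-- ===== CLAIM (what is proved, stated in full; the proofs are below) =====
def Claim_equal_check_self_complementarity : Prop := ∀ (seq : String) (max_run : Int), Dom_check_self_complementarity seq max_run → Spec_check_self_complementarity seq max_run (check_self_complementarity seq max_run)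

-- ===== LEMMAS AND PROOFS =====

-- the length of the common run starting at (i, j); A's while loop computes it
-- by counting, B's DP rows tabulate it.
def pvRun (s t : List Char) (i j : Nat) : Nat :=
  if h : i < s.length ∧ j < t.length ∧ s.getD i ' ' = t.getD j ' '
  then pvRun s t (i + 1) (j + 1) + 1
  else 0
termination_by s.length - i
decreasing_by omega

lemma pvRun_out_s (s t : List Char) (i j : Nat) (h : ¬ i < s.length) : pvRun s t i j = 0 := by
  rw [pvRun, dif_neg]; tauto

lemma pvRun_out_t (s t : List Char) (i j : Nat) (h : ¬ j < t.length) : pvRun s t i j = 0 := by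
  rw [pvRun, dif_neg]; tauto

lemma getD_set_ne (l : List Nat) (i j v : Nat) (h : i ≠ j) : (l.set i v).getD j 0 = l.getD j 0 := by
  simp [List.getD, List.getElem?_set_ne h]
lemma getD_set_eq (l : List Nat) (i v : Nat) (h : i < l.length) : (l.set i v).getD i 0 = v := by
  simp [List.getD, h]

lemma pvInner (s t : List Char) (i : Nat) (hi : i < s.length) (next : List Nat)
    (hnext : ∀ j, next.getD j 0 = pvRun s t (i + 1) j) :
    ∀ (k : Nat), k ≤ t.length → ∀ (b0 : Nat) (row0 : List Nat),
      row0.length = t.length + 1 →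
      (∀ j, j < k → row0.getD j 0 = 0) →
      ∀ res : Nat × List Nat,
      res = (((List.range k).reverse).foldl
        (fun (st2 : Nat × List Nat) j =>
          if s.getD i ' ' = t.getD j ' ' then
            (if next.getD (j + 1) 0 + 1 > st2.1 then next.getD (j + 1) 0 + 1 else st2.1,
             st2.2.set j (next.getD (j + 1) 0 + 1))
          else st2)
        (b0, row0)) →
      res.2.length = t.length + 1 ∧
      (∀ j, j < k → res.2.getD j 0 = pvRun s t i j) ∧
      (∀ j, k ≤ j → res.2.getD j 0 = row0.getD j 0) ∧
      res.1 = ((List.range k).reverse).foldl (fun a j => max a (pvRun s t i j)) b0 := by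
  intro k
  induction k with
  | zero =>
    intro _ b0 row0 hlen h0 res hres
    subst hres
    refine ⟨hlen, by omega, fun j _ => rfl, rfl⟩
  | succ k ih =>
    intro hk b0 row0 hlen h0 res hres
    rw [List.range_succ, List.reverse_append] at hres
    simp only [List.reverse_cons, List.reverse_nil, List.nil_append, List.singleton_append,
      List.foldl_cons] at hres
    rw [List.range_succ, List.reverse_append]
    simp only [List.reverse_cons, List.reverse_nil, List.nil_append, List.singleton_append,
      List.foldl_cons]
    by_cases hc : s.getD i ' ' = t.getD k ' '
    · -- matching characters at (i, k)
      rw [if_pos hc] at hres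
      have hkm : k < t.length := by omega
      have hrun : pvRun s t i k = next.getD (k + 1) 0 + 1 := by
        rw [pvRun, dif_pos ⟨hi, hkm, hc⟩, hnext]
      have h1 := ih (by omega) (if next.getD (k + 1) 0 + 1 > b0 then next.getD (k + 1) 0 + 1 else b0)
        (row0.set k (next.getD (k + 1) 0 + 1))
        (by simpa using hlen)
        (fun j hj => by rw [getD_set_ne _ _ _ _ (by omega)]; exact h0 j (by omega))
        res hres
      refine ⟨h1.1, ?_, ?_, ?_⟩
      · intro j hj
        rcases Nat.lt_or_ge j k with hj' | hj'
        · exact h1.2.1 j hj'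
        · have hjk : j = k := by omega
          subst hjk
          rw [h1.2.2.1 j (le_refl _), getD_set_eq _ _ _ (by omega), hrun]
      · intro j hj
        rw [h1.2.2.1 j (by omega), getD_set_ne _ _ _ _ (by omega)]
      · rw [h1.2.2.2, hrun]
        congr 1
        split <;> omega
    · -- non-matching characters: nothing set, run is 0
      rw [if_neg hc] at hres
      have hrun : pvRun s t i k = 0 := by
        rw [pvRun, dif_neg]; tauto
      have h1 := ih (by omega) b0 row0 hlen (fun j hj => h0 j (by omega)) res hres
      refine ⟨h1.1, ?_, ?_, ?_⟩
      · intro j hj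
        rcases Nat.lt_or_ge j k with hj' | hj'
        · exact h1.2.1 j hj'
        · have hjk : j = k := by omega
          subst hjk
          rw [h1.2.2.1 j (le_refl _), h0 j (by omega), hrun]
      · intro j hj
        exact h1.2.2.1 j (by omega)
      · rw [h1.2.2.2, hrun]
        simp

lemma getD_replicate_zero (n j : Nat) : (List.replicate n (0:Nat)).getD j 0 = 0 := by
  rcases Nat.lt_or_ge j n with h | h
  · simp [List.getD, h]
  · have hl : (List.replicate n (0:Nat)).length ≤ j := by simpa using h
    simp [List.getD, List.getElem?_eq_none hl]

lemma pvOuter (s t : List Char) :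
    ∀ (k : Nat), k ≤ s.length → ∀ (b0 : Nat) (next0 : List Nat),
      next0.length = t.length + 1 →
      (∀ j, next0.getD j 0 = pvRun s t k j) →
      (((List.range k).reverse).foldl
        (fun (st : Nat × List Nat) i =>
          ((List.range t.length).reverse).foldl
            (fun (st2 : Nat × List Nat) j =>
              if s.getD i ' ' = t.getD j ' ' then
                (if st.2.getD (j + 1) 0 + 1 > st2.1 then st.2.getD (j + 1) 0 + 1 else st2.1,
                 st2.2.set j (st.2.getD (j + 1) 0 + 1))
              else st2)
            (st.1, List.replicate (t.length + 1) 0))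
        (b0, next0)).1
      = ((List.range k).reverse).foldl
          (fun a i => ((List.range t.length).reverse).foldl (fun a2 j => max a2 (pvRun s t i j)) a) b0 := by
  intro k
  induction k with
  | zero => intro _ b0 next0 _ _; rfl
  | succ k ih =>
    intro hk b0 next0 hlen hnext
    rw [List.range_succ, List.reverse_append]
    simp only [List.reverse_cons, List.reverse_nil, List.nil_append, List.singleton_append,
      List.foldl_cons]
    have h1 := pvInner s t k (by omega) next0 hnext t.length (le_refl _) b0
      (List.replicate (t.length + 1) 0) (by simp)
      (fun j _ => getD_replicate_zero _ _)
      _ rfl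
    have hrow : ∀ j, (((List.range t.length).reverse).foldl
        (fun (st2 : Nat × List Nat) j =>
          if s.getD k ' ' = t.getD j ' ' then
            (if next0.getD (j + 1) 0 + 1 > st2.1 then next0.getD (j + 1) 0 + 1 else st2.1,
             st2.2.set j (next0.getD (j + 1) 0 + 1))
          else st2)
        (b0, List.replicate (t.length + 1) 0)).2.getD j 0 = pvRun s t k j := by
      intro j
      rcases Nat.lt_or_ge j t.length with hj | hj
      · exact h1.2.1 j hj
      · rw [h1.2.2.1 j hj, getD_replicate_zero, pvRun_out_t _ _ _ _ (by omega)]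
    rw [ih (by omega) _ _ h1.1 hrow, h1.2.2.2]

lemma pvWhileRun_eq (s t : List Char) (i j r : Nat) :
    pvWhileRun s t i j r = r + pvRun s t (i + r) (j + r) := by
  fun_induction pvWhileRun s t i j r with
  | case1 r h ih =>
    rw [pvRun, dif_pos h]
    rw [show i + r + 1 = i + (r + 1) by omega, show j + r + 1 = j + (r + 1) by omega]
    omega
  | case2 r h =>
    rw [pvRun, dif_neg h]; omega

lemma foldl_max_shift (f : Nat → Nat) (l : List Nat) (a b : Nat) :
    l.foldl (fun x y => max x (f y)) (max a b) = max (l.foldl (fun x y => max x (f y)) a) b := by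
  induction l generalizing a with
  | nil => rfl
  | cons h tl ih =>
    simp only [List.foldl_cons]
    rw [show max (max a b) (f h) = max (max a (f h)) b by omega, ih]

lemma foldl_max_reverse (f : Nat → Nat) (l : List Nat) (a : Nat) :
    l.reverse.foldl (fun x y => max x (f y)) a = l.foldl (fun x y => max x (f y)) a := by
  induction l generalizing a with
  | nil => rfl
  | cons h tl ih =>
    rw [List.reverse_cons, List.foldl_append]
    simp only [List.foldl_cons, List.foldl_nil]
    rw [ih, foldl_max_shift]

lemma foldl_max_init (f : Nat → Nat) (l : List Nat) (a : Nat) :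
    l.foldl (fun x y => max x (f y)) a = max a (l.foldl (fun x y => max x (f y)) 0) := by
  have h := foldl_max_shift f l 0 a
  simp only [Nat.zero_max] at h
  rw [h, Nat.max_comm]

-- ===== VERDICT (by name: the statement is the Claim_ definition above) =====
set_option maxHeartbeats 1000000 in
theorem check_self_complementarity_spec : Claim_equal_check_self_complementarity := by
  intro seq max_run _hdom
  unfold Spec_check_self_complementarity
  have hBA : pvRevCompB = pvRevCompA := rfl
  simp only [check_self_complementarity, check_self_complementarity_alt, hBA]
  set s := (PySem.Str.upper seq).toList with hs
  set t := pvRevCompA s with ht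
  congr 1
  rw [pvOuter s t s.length (le_refl _) 0 (List.replicate (t.length + 1) 0) (by simp)
    (fun j => by rw [getD_replicate_zero, pvRun_out_s s t s.length j (Nat.lt_irrefl _)])]
  simp only [pvWhileRun_eq, Nat.zero_add, Nat.add_zero]
  have h1 : (fun (a i : Nat) =>
      List.foldl (fun a2 j => max a2 (pvRun s t i j)) a (List.range t.length))
      = (fun (a i : Nat) =>
        max a (List.foldl (fun a2 j => max a2 (pvRun s t i j)) 0 (List.range t.length))) :=
    funext fun a => funext fun i => foldl_max_init _ _ _
  have h2 : (fun (a i : Nat) =>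
      List.foldl (fun a2 j => max a2 (pvRun s t i j)) a (List.range t.length).reverse)
      = (fun (a i : Nat) =>
        max a (List.foldl (fun a2 j => max a2 (pvRun s t i j)) 0 (List.range t.length))) :=
    funext fun a => funext fun i => by rw [foldl_max_reverse]; exact foldl_max_init _ _ _
  rw [h1, h2]
  exact (foldl_max_reverse
    (fun i => List.foldl (fun a2 j => max a2 (pvRun s t i j)) 0 (List.range t.length))
    (List.range s.length) 0).symm
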